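-- pv_equiv track=rewrite | github.com/RuleIQ-Vercel-Deploy/ruleIQ | services/ai/iq_neo4j_integration.py | _identify_automatable_controls
-- ===== SOURCE A (Python) =====
-- from typing import Any, Dict, List
--
-- def _identify_automatable_controls(controls: List[str]) -> List[str]:
--     """Identify which controls can be automated."""
--     automatable_keywords = [
--         "monitoring",
--         "logging",
--         "scanning",
--         "detection",
--         "reporting",
--         "validation",
--         "encryption",
--         "backup",
--         "audit",
--     ]
--     automatable = []
--     for control in controls:
--         if any(keyword in control.lower() for keyword in automatable_keywords):
--             automatable.append(control)
--     return automatable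
-- ===== SOURCE B (Python) =====
-- _KEYWORDS = (
--     "monitoring",
--     "logging",
--     "scanning",
--     "detection",
--     "reporting",
--     "validation",
--     "encryption",
--     "backup",
--     "audit",
-- )
--
--
-- def _matches(low):
--     """Position-major scan: does any keyword start at some position of low?"""
--     for j in range(len(low)):
--         if low.startswith(_KEYWORDS, j):
--             return True
--     return False
--
--
-- def _identify_automatable_controls(controls):
--     """Identify which controls can be automated."""
--     return [control for control in controls if _matches(control.lower())]
-- ===== Notes on version B (the rewrite author's own statement) =====
-- stated objective: alternative
-- what changed: Replaces A's keyword-major loop (an accumulator list plus an inner any() of substring-containment tests, one full scan of the control per keyword) with a position-major scan: walk the lowered control once and at each position test whether any keyword starts there (startswith with the keyword tuple), the filter itself becoming a comprehension.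
import Mathlib
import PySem

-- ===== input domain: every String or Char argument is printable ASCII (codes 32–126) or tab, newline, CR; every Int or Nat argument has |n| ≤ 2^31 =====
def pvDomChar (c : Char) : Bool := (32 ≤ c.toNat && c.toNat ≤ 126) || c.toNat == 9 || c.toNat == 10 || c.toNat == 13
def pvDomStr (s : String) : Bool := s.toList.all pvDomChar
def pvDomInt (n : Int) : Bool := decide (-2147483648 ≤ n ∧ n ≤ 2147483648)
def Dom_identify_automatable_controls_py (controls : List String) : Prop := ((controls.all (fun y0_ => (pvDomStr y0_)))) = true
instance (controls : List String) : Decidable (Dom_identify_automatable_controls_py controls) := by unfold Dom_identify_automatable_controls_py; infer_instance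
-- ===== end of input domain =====

-- B replaces A's keyword-major inner any() of substring tests plus an accumulator loop
-- with a comprehension filtering by a position-major prefix scan of the lowered control (alternative decomposition; return value only).

-- ===== PORT A =====
def identify_automatable_controls_py (controls : List String) : List String :=
  let automatable_keywords : List String :=
    ["monitoring", "logging", "scanning", "detection", "reporting",
     "validation", "encryption", "backup", "audit"]
  controls.foldl (fun automatable control =>
    if automatable_keywords.any (fun keyword => PySem.Str.isIn keyword (PySem.Str.lower control)) then
      automatable ++ [control]
    else automatable) []

-- ===== PORT B =====
-- the keyword tuple of Source B, as char lists
def pvKwChars : List (List Char) :=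
  ["monitoring".toList, "logging".toList, "scanning".toList, "detection".toList,
   "reporting".toList, "validation".toList, "encryption".toList, "backup".toList,
   "audit".toList]

-- Source B's _matches: walk the positions of low; at each, low.startswith(KEYWORDS, j)
def pvMatches : List Char → Bool
  | [] => false
  | c :: rest => pvKwChars.any (fun kw => kw.isPrefixOf (c :: rest)) || pvMatches rest

def identify_automatable_controls_py_alt (controls : List String) : List String :=
  controls.filter (fun control => pvMatches (PySem.Chars.lower control.toList))

-- ===== PRECONDITION & SPEC =====
def Spec_identify_automatable_controls_py (controls : List String) (out : List String) : Prop := out = identify_automatable_controls_py_alt controls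
instance (controls : List String) (out : List String) : Decidable (Spec_identify_automatable_controls_py controls out) := by unfold Spec_identify_automatable_controls_py; infer_instance

-- ===== CLAIM (what is proved, stated in full; the proofs are below) =====
def Claim_equal_identify_automatable_controls_py : Prop := ∀ (controls : List String), Dom_identify_automatable_controls_py controls → Spec_identify_automatable_controls_py controls (identify_automatable_controls_py controls)

-- ===== LEMMAS AND PROOFS =====

-- boolean any distributes over a pointwise or
theorem pvAnyOrSplit {α : Type} (l : List α) (p q : α → Bool) :
    l.any (fun x => p x || q x) = (l.any p || l.any q) := by
  induction l with
  | nil => simp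
  | cons a t ih =>
    simp only [List.any_cons, ih]
    cases p a <;> cases q a <;> simp

-- the position-major scan finds exactly the keywords occurring as infixes (keywords are nonempty)
theorem pvMatches_eq (l : List Char) :
    pvMatches l = pvKwChars.any (fun kw => PySem.Chars.isIn kw l) := by
  induction l with
  | nil =>
    simp only [pvMatches]
    symm
    simp only [List.any_eq_false]
    intro kw hkw
    simp only [PySem.Chars.isIn_iff_infix]
    intro hinf
    have : kw = [] := List.eq_nil_of_infix_nil hinf
    subst this
    simp [pvKwChars] at hkw
  | cons c rest ih =>
    simp only [pvMatches, ih]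
    rw [← pvAnyOrSplit]
    apply List.any_congr rfl
    intro kw
    rw [Bool.eq_iff_iff]
    simp only [Bool.or_eq_true, List.isPrefixOf_iff_prefix, PySem.Chars.isIn_iff_infix,
      List.infix_cons_iff]

theorem identify_automatable_controls_py_spec : Claim_equal_identify_automatable_controls_py := by
  intro controls _
  unfold Spec_identify_automatable_controls_py identify_automatable_controls_py
    identify_automatable_controls_py_alt
  rw [PySem.List.foldl_append_if_eq_filter]
  simp only [List.nil_append]
  apply List.filter_congr
  intro control _
  rw [pvMatches_eq]
  simp [pvKwChars, List.any_cons, List.any_nil, PySem.Str.isIn]
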